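-- pv_equiv track=rewrite | github.com/MrBrantCode/unitest_baseline | mut_generate/mist_train_cf/cf_58610/solution.py | solve
-- ===== SOURCE A (Python) =====
-- def solve(matrix):
--     """
--     This function receives a two-dimensional array, filters invalid words, and finds the longest valid string.
--     """
--     max_length = 0
--     longest_string = ''
--     for row in matrix:
--         for s in row:
--             if '/' not in s and '{' not in s and len(s) > max_length:
--                 max_length = len(s)
--                 longest_string = s
--     return longest_string
-- ===== SOURCE B (Python) =====
-- def solve(matrix):
--     """
--     This function receives a two-dimensional array, filters invalid words, and finds the longest valid string.
--     """
--     valid = [s for row in matrix for s in row if '/' not in s and '{' not in s]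
--     ranked = sorted(valid, key=len, reverse=True)
--     return ranked[0] if ranked else ''
-- ===== Notes on version B (the rewrite author's own statement) =====
-- stated objective: idiomatic
-- what changed: Replaces the manual running-max loop over nested rows with a flat filtering comprehension followed by a stable length-descending sort, returning the first element (sort stability preserves A's first-occurrence tie-breaking).
import Mathlib
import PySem

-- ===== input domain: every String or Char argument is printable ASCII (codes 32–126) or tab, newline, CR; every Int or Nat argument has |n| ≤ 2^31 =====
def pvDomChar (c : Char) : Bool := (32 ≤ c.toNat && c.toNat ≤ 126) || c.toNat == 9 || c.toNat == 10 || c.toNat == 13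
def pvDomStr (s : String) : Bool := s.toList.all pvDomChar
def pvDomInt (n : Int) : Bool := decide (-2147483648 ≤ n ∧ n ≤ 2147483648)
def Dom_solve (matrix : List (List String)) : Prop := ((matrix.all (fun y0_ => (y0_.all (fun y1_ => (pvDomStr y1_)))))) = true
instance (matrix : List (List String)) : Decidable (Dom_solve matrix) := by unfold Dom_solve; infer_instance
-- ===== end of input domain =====

-- B replaces A's nested running-max loop by filter + stable length-descending sort + head: an alternative decomposition of the same task.


-- ===== PORT A =====
-- the body of A's inner loop: update (max_length, longest_string) on a valid, strictly longer string
def pvStepA (st : Int × String) (s : String) : Int × String :=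
  if !(PySem.Str.isIn "/" s) && !(PySem.Str.isIn "{" s) && decide (st.1 < PySem.Str.len s)
  then (PySem.Str.len s, s) else st

def solve (matrix : List (List String)) : String :=
  (matrix.foldl (fun st row => row.foldl pvStepA st) ((0 : Int), "")).2

-- ===== PORT B =====
-- B's validity test: '/' not in s and '{' not in s
def pvValid (s : String) : Bool := !(PySem.Str.isIn "/" s) && !(PySem.Str.isIn "{" s)

def solve_alt (matrix : List (List String)) : String :=
  match PySem.List.sorted ((matrix.flatMap (fun row => row)).filter pvValid)
      (fun s => PySem.Str.len s) true with
  | [] => ""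
  | x :: _ => x

-- ===== PRECONDITION & SPEC =====
def Spec_solve (matrix : List (List String)) (out : String) : Prop := out = solve_alt matrix
instance (matrix : List (List String)) (out : String) : Decidable (Spec_solve matrix out) := by unfold Spec_solve; infer_instance

-- ===== CLAIM (what is proved, stated in full; the proofs are below) =====
def Claim_equal_solve : Prop := ∀ (matrix : List (List String)), Dom_solve matrix → Spec_solve matrix (solve matrix)

-- ===== LEMMAS AND PROOFS =====

-- A's step restricted to valid strings (validity test removed)
def pvStepV (st : Int × String) (s : String) : Int × String :=
  if st.1 < PySem.Str.len s then (PySem.Str.len s, s) else st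

theorem insertBy_nil {α : Type} (b : α → α → Bool) (x : α) :
    PySem.List.insertBy b x [] = [x] := rfl

theorem insertBy_cons {α : Type} (b : α → α → Bool) (x y : α) (ys : List α) :
    PySem.List.insertBy b x (y :: ys)
      = if b x y then x :: y :: ys else y :: PySem.List.insertBy b x ys := rfl

-- A's nested fold is the fold over the flattened list
theorem foldl_nested (ll : List (List String)) (st : Int × String) :
    ll.foldl (fun st row => row.foldl pvStepA st) st
      = (ll.flatMap (fun row => row)).foldl pvStepA st := by
  induction ll generalizing st with
  | nil => rfl
  | cons r t ih => simp [List.flatMap_cons, List.foldl_append, ih]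

-- invalid strings are skipped, so folding over the filtered list is the same
theorem foldl_filter (xs : List String) (st : Int × String) :
    xs.foldl pvStepA st = (xs.filter pvValid).foldl pvStepV st := by
  induction xs generalizing st with
  | nil => rfl
  | cons x t ih =>
    have hstep : ∀ st : Int × String,
        pvStepA st x = if pvValid x && decide (st.1 < PySem.Str.len x)
          then (PySem.Str.len x, x) else st := by
      intro st; simp only [pvStepA, pvValid, Bool.and_assoc]
    cases hv : pvValid x
    · simp [List.foldl_cons, hstep, hv, ih]
    · have hx : ∀ st : Int × String, pvStepA st x = pvStepV st x := by
        intro st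
        simp [hstep, hv, pvStepV]
      simp [List.foldl_cons, hv, hx, ih]

-- a string of length ≤ 0 is the empty string
theorem len_le_zero (s : String) (h : PySem.Str.len s ≤ 0) : s = "" := by
  have h0 : s.toList.length = 0 := by
    have : (s.toList.length : Int) ≤ 0 := h
    omega
  have hnil : s.toList = [] := List.length_eq_zero_iff.mp h0
  have := congrArg String.ofList hnil
  simpa using this

-- the relation between A's accumulator and the stable descending insertion list
def pvRel (st : Int × String) (L : List String) : Prop :=
  (L = [] ∧ st = (0, "")) ∨ (∃ t, L = st.2 :: t ∧ st.1 = PySem.Str.len st.2)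

theorem pvRel_step (st : Int × String) (L : List String) (x : String)
    (h : pvRel st L) :
    pvRel (pvStepV st x)
      (PySem.List.insertBy (fun a b => decide (PySem.Str.len b < PySem.Str.len a)) x L) := by
  rcases h with ⟨hL, hst⟩ | ⟨t, hL, hlen⟩
  · subst hL; subst hst
    rw [insertBy_nil]
    by_cases hx : (0 : Int) < PySem.Str.len x
    · have hstep : pvStepV ((0 : Int), "") x = (PySem.Str.len x, x) := by
        simp only [pvStepV, if_pos hx]
      exact Or.inr ⟨[], by rw [hstep], by rw [hstep]⟩
    · have hx0 : x = "" := len_le_zero x (le_of_not_gt hx)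
      have hstep : pvStepV ((0 : Int), "") x = ((0 : Int), "") := by
        simp only [pvStepV, if_neg hx]
      refine Or.inr ⟨[], ?_, ?_⟩
      · rw [hstep, hx0]
      · rw [hstep]; decide
  · subst hL
    by_cases hx : st.1 < PySem.Str.len x
    · have hbefore : decide (PySem.Str.len st.2 < PySem.Str.len x) = true := by
        rw [decide_eq_true_iff]; omega
      have hstep : pvStepV st x = (PySem.Str.len x, x) := by
        simp only [pvStepV, if_pos hx]
      rw [insertBy_cons, hbefore, if_pos rfl, hstep]
      exact Or.inr ⟨st.2 :: t, rfl, rfl⟩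
    · have hbefore : decide (PySem.Str.len st.2 < PySem.Str.len x) = false := by
        rw [decide_eq_false_iff_not]; omega
      have hstep : pvStepV st x = st := by simp only [pvStepV, if_neg hx]
      have hins : PySem.List.insertBy (fun a b => decide (PySem.Str.len b < PySem.Str.len a)) x (st.2 :: t)
          = st.2 :: PySem.List.insertBy (fun a b => decide (PySem.Str.len b < PySem.Str.len a)) x t := by
        rw [insertBy_cons, hbefore]; simp
      rw [hins, hstep]
      exact Or.inr ⟨_, rfl, hlen⟩

theorem pvRel_foldl (xs : List String) (st : Int × String) (L : List String)
    (h : pvRel st L) :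
    pvRel (xs.foldl pvStepV st)
      (xs.foldl (fun acc x =>
        PySem.List.insertBy (fun a b => decide (PySem.Str.len b < PySem.Str.len a)) x acc) L) := by
  induction xs generalizing st L with
  | nil => exact h
  | cons x t ih => exact ih _ _ (pvRel_step st L x h)

-- ===== VERDICT (by name: the statement is the Claim_ definition above) =====
theorem solve_spec : Claim_equal_solve := by
  intro matrix _
  unfold Spec_solve solve solve_alt
  rw [PySem.List.sorted_rev_eq_foldl_insertBy, foldl_nested, foldl_filter]
  rcases pvRel_foldl ((matrix.flatMap (fun row => row)).filter pvValid)
      ((0 : Int), "") [] (Or.inl (And.intro rfl rfl)) with ⟨hL, hst⟩ | ⟨t, hL, _⟩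
  · rw [hL, hst]
  · rw [hL]
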